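-- pv_equiv track=rewrite | github.com/Leedefend/sce-backend-odoo | scripts/verify/delivery_readiness_scoreboard_refresh.py | _normalize_evidence_table
-- ===== SOURCE A (Python) =====
-- def _normalize_evidence_table(lines: list[str]) -> list[str]:
--     start = -1
--     end = -1
--     for index, line in enumerate(lines):
--         if line.strip() == "## System-Bound Evidence Summary":
--             start = index
--             break
--     if start < 0:
--         return lines
--     for index in range(start + 1, len(lines)):
--         if lines[index].startswith("## "):
--             end = index
--             break
--     if end < 0:
--         end = len(lines)
--
--     section = lines[start:end]
--     normalized: list[str] = []
--     previous_was_table_row = False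
--     for line in section:
--         is_table_row = line.startswith("|")
--         if not line.strip() and previous_was_table_row:
--             continue
--         normalized.append(line)
--         previous_was_table_row = is_table_row
--
--     return lines[:start] + normalized + lines[end:]
-- ===== SOURCE B (Python) =====
-- def _normalize_evidence_table(lines: list[str]) -> list[str]:
--     header = "## System-Bound Evidence Summary"
--     out: list[str] = []
--     in_section = False
--     done = False
--     previous_was_table_row = False
--     for line in lines:
--         if in_section and line.startswith("## "):
--             in_section = False
--             done = True
--         elif not in_section and not done and line.strip() == header:
--             in_section = True
--         elif in_section and not line.strip() and previous_was_table_row: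
--             continue
--         if in_section:
--             previous_was_table_row = line.startswith("|")
--         out.append(line)
--     return out
-- ===== Notes on version B (the rewrite author's own statement) =====
-- stated objective: simpler
-- what changed: Replaced A's four-phase index computation (find start index, find end index over a range, slice out the section, normalize it, re-concatenate three slices) by a single linear state-machine pass over the lines with in_section/done/previous_was_table_row flags, appending or skipping each line as it goes.
import Mathlib
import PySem

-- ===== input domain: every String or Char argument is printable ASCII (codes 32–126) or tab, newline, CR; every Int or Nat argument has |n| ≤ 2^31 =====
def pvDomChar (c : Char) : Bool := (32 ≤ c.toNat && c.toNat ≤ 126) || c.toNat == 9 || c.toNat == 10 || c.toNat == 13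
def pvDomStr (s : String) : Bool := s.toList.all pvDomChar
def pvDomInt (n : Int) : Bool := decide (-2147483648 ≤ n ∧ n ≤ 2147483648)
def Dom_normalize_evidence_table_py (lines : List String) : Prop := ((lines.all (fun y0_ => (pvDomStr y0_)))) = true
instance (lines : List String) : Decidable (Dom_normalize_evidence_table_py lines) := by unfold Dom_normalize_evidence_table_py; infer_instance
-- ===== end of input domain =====

-- ===== PORT A =====
-- B replaces A's slice-and-reassemble index computation by one linear state-machine pass (objective: simpler).
def pvHeader : String := "## System-Bound Evidence Summary"

-- 'for index, line in enumerate(lines): if line.strip() == …: start = index; break'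
def aFindStart : List String → Int → Int
  | [], _ => -1
  | l :: ls, i => if PySem.Str.strip l = pvHeader then i else aFindStart ls (i + 1)

-- 'for index in range(start + 1, len(lines)): if lines[index].startswith("## "): end = index; break'
-- (.getD "" only totalizes the in-range lines[index] access; every scanned index is in range)
def aFindEnd (lines : List String) : List Int → Int
  | [] => -1
  | i :: rest =>
    if PySem.Str.startswith ((PySem.List.pyGet? lines i).getD "") "## " then i
    else aFindEnd lines rest

-- the body of A's normalization loop; state = (normalized, previous_was_table_row)
def aStep (st : List String × Bool) (line : String) : List String × Bool :=
  if PySem.Str.strip line = "" ∧ st.2 = true then st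
  else (st.1 ++ [line], PySem.Str.startswith line "|")

def normalize_evidence_table_py (lines : List String) : List String :=
  let start := aFindStart lines 0
  if start < 0 then lines
  else
    let end0 := aFindEnd lines (PySem.List.pyRange (start + 1) (lines.length : Int) 1)
    let end1 := if end0 < 0 then (lines.length : Int) else end0
    let sect := PySem.List.slice lines (some start) (some end1)
    let normalized := (sect.foldl aStep (([] : List String), false)).1
    PySem.List.slice lines none (some start) ++ normalized ++ PySem.List.slice lines (some end1) none

-- ===== PORT B =====
-- the body of B's single pass; state = (out, in_section, done, previous_was_table_row)
def bStep (st : List String × Bool × Bool × Bool) (line : String) : List String × Bool × Bool × Bool :=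
  if st.2.1 = true ∧ PySem.Str.startswith line "## " = true then
    (st.1 ++ [line], false, true, st.2.2.2)
  else if st.2.1 = false ∧ st.2.2.1 = false ∧ PySem.Str.strip line = pvHeader then
    (st.1 ++ [line], true, st.2.2.1, PySem.Str.startswith line "|")
  else if st.2.1 = true ∧ PySem.Str.strip line = "" ∧ st.2.2.2 = true then
    st
  else
    (st.1 ++ [line], st.2.1, st.2.2.1,
      if st.2.1 = true then PySem.Str.startswith line "|" else st.2.2.2)

def normalize_evidence_table_py_alt (lines : List String) : List String :=
  (lines.foldl bStep (([] : List String), false, false, false)).1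

-- ===== PRECONDITION & SPEC =====
def Spec_normalize_evidence_table_py (lines : List String) (out : List String) : Prop := out = normalize_evidence_table_py_alt lines
instance (lines : List String) (out : List String) : Decidable (Spec_normalize_evidence_table_py lines out) := by unfold Spec_normalize_evidence_table_py; infer_instance

-- ===== CLAIM (what is proved, stated in full; the proofs are below) =====
def Claim_equal_normalize_evidence_table_py : Prop := ∀ (lines : List String), Dom_normalize_evidence_table_py lines → Spec_normalize_evidence_table_py lines (normalize_evidence_table_py lines)

-- ===== LEMMAS AND PROOFS =====

-- Common characterization of what both programs compute.
def specNorm (prev : Bool) : List String → List String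
  | [] => []
  | t :: ts =>
    if PySem.Str.startswith t "## " = true then t :: ts
    else if PySem.Str.strip t = "" ∧ prev = true then specNorm prev ts
    else t :: specNorm (PySem.Str.startswith t "|") ts

def specTop : List String → List String
  | [] => []
  | l :: ls =>
    if PySem.Str.strip l = pvHeader then l :: specNorm (PySem.Str.startswith l "|") ls
    else l :: specTop ls

-- index of the first "## "-line, else length
def endIdx (ls : List String) : Nat :=
  (List.findIdx? (fun t => PySem.Str.startswith t "## ") ls).getD ls.length

lemma endIdx_cons_pos (t : String) (ts : List String)
    (h : PySem.Str.startswith t "## " = true) : endIdx (t :: ts) = 0 := by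
  rw [endIdx, List.findIdx?_cons, if_pos h]
  rfl

lemma endIdx_cons_neg (t : String) (ts : List String)
    (h : ¬ PySem.Str.startswith t "## " = true) : endIdx (t :: ts) = endIdx ts + 1 := by
  rw [endIdx, List.findIdx?_cons, if_neg h]
  cases hfi : List.findIdx? (fun t => PySem.Str.startswith t "## ") ts with
  | none => rw [endIdx, hfi]; rfl
  | some n => rw [endIdx, hfi]; rfl

lemma specTop_id (ls : List String) (h : ∀ x ∈ ls, ¬ PySem.Str.strip x = pvHeader) :
    specTop ls = ls := by
  induction ls with
  | nil => rfl
  | cons l ls ih =>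
    rw [specTop, if_neg (h l (List.mem_cons_self ..)),
        ih (fun x hx => h x (List.mem_cons_of_mem _ hx))]

lemma specTop_decomp (pre : List String) (l : String) (ls : List String)
    (hpre : ∀ x ∈ pre, ¬ PySem.Str.strip x = pvHeader) (hl : PySem.Str.strip l = pvHeader) :
    specTop (pre ++ l :: ls) = pre ++ l :: specNorm (PySem.Str.startswith l "|") ls := by
  induction pre with
  | nil => simp only [List.nil_append, specTop, if_pos hl]
  | cons p ps ih =>
    rw [List.cons_append, specTop, if_neg (hpre p (List.mem_cons_self ..)),
        ih (fun x hx => hpre x (List.mem_cons_of_mem _ hx)), List.cons_append]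

-- ===== B-side: the single pass computes specTop =====
lemma bStep_after (out : List String) (prev : Bool) (l : String) :
    bStep (out, false, true, prev) l = (out ++ [l], false, true, prev) := by
  unfold bStep
  rw [if_neg (by rintro ⟨h, -⟩; cases h), if_neg (by rintro ⟨-, h, -⟩; cases h),
      if_neg (by rintro ⟨h, -⟩; cases h), if_neg (by rintro h; cases h)]

lemma bStep_close (out : List String) (prev : Bool) (l : String)
    (h1 : PySem.Str.startswith l "## " = true) :
    bStep (out, true, false, prev) l = (out ++ [l], false, true, prev) := by
  unfold bStep; rw [if_pos ⟨rfl, h1⟩]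

lemma bStep_skip (out : List String) (prev : Bool) (l : String)
    (h1 : ¬ PySem.Str.startswith l "## " = true)
    (h2 : PySem.Str.strip l = "" ∧ prev = true) :
    bStep (out, true, false, prev) l = (out, true, false, prev) := by
  unfold bStep
  rw [if_neg (by rintro ⟨-, h⟩; exact h1 h), if_neg (by rintro ⟨h, -⟩; cases h),
      if_pos ⟨rfl, h2⟩]

lemma bStep_keepIn (out : List String) (prev : Bool) (l : String)
    (h1 : ¬ PySem.Str.startswith l "## " = true)
    (h2 : ¬ (PySem.Str.strip l = "" ∧ prev = true)) :
    bStep (out, true, false, prev) l = (out ++ [l], true, false, PySem.Str.startswith l "|") := by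
  unfold bStep
  rw [if_neg (by rintro ⟨-, h⟩; exact h1 h), if_neg (by rintro ⟨h, -⟩; cases h),
      if_neg (by rintro ⟨-, h3, h4⟩; exact h2 ⟨h3, h4⟩), if_pos rfl]

lemma bStep_open (out : List String) (prev : Bool) (l : String)
    (h1 : PySem.Str.strip l = pvHeader) :
    bStep (out, false, false, prev) l = (out ++ [l], true, false, PySem.Str.startswith l "|") := by
  unfold bStep
  rw [if_neg (by rintro ⟨h, -⟩; cases h), if_pos ⟨rfl, rfl, h1⟩]

lemma bStep_pass (out : List String) (prev : Bool) (l : String)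
    (h1 : ¬ PySem.Str.strip l = pvHeader) :
    bStep (out, false, false, prev) l = (out ++ [l], false, false, prev) := by
  unfold bStep
  rw [if_neg (by rintro ⟨h, -⟩; cases h), if_neg (by rintro ⟨-, -, h⟩; exact h1 h),
      if_neg (by rintro ⟨h, -⟩; cases h), if_neg (by rintro h; cases h)]

lemma bDone (ls : List String) : ∀ (out : List String) (prev : Bool),
    (ls.foldl bStep (out, false, true, prev)).1 = out ++ ls := by
  induction ls with
  | nil => intro out prev; simp
  | cons l ls ih =>
    intro out prev
    rw [List.foldl_cons, bStep_after, ih]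
    simp

lemma bIn (ls : List String) : ∀ (out : List String) (prev : Bool),
    (ls.foldl bStep (out, true, false, prev)).1 = out ++ specNorm prev ls := by
  induction ls with
  | nil => intro out prev; simp [specNorm]
  | cons l ls ih =>
    intro out prev
    rw [List.foldl_cons, specNorm]
    by_cases h1 : PySem.Str.startswith l "## " = true
    · rw [bStep_close out prev l h1, if_pos h1, bDone]
      simp
    · rw [if_neg h1]
      by_cases h2 : PySem.Str.strip l = "" ∧ prev = true
      · rw [bStep_skip out prev l h1 h2, if_pos h2, ih]
      · rw [bStep_keepIn out prev l h1 h2, if_neg h2, ih]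
        simp

lemma bTop (ls : List String) : ∀ (out : List String),
    (ls.foldl bStep (out, false, false, false)).1 = out ++ specTop ls := by
  induction ls with
  | nil => intro out; simp [specTop]
  | cons l ls ih =>
    intro out
    rw [List.foldl_cons, specTop]
    by_cases h1 : PySem.Str.strip l = pvHeader
    · rw [bStep_open out false l h1, if_pos h1, bIn]
      simp
    · rw [bStep_pass out false l h1, if_neg h1, ih]
      simp

lemma B_eq_specTop (lines : List String) :
    normalize_evidence_table_py_alt lines = specTop lines := by
  unfold normalize_evidence_table_py_alt
  rw [bTop lines []]
  simp

-- ===== A-side: slice-and-reassemble computes specTop too =====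
lemma aFindStart_none (ls : List String) : ∀ (i : Int),
    (∀ x ∈ ls, ¬ PySem.Str.strip x = pvHeader) → aFindStart ls i = -1 := by
  induction ls with
  | nil => intro i _; rfl
  | cons l ls ih =>
    intro i h
    rw [aFindStart, if_neg (h l (List.mem_cons_self ..))]
    exact ih _ (fun x hx => h x (List.mem_cons_of_mem _ hx))

lemma aFindStart_prefix (pre : List String) : ∀ (i : Int) (l : String) (ls : List String),
    (∀ x ∈ pre, ¬ PySem.Str.strip x = pvHeader) → PySem.Str.strip l = pvHeader →
    aFindStart (pre ++ l :: ls) i = i + pre.length := by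
  induction pre with
  | nil => intro i l ls _ hl; rw [List.nil_append, aFindStart, if_pos hl]; simp
  | cons p ps ih =>
    intro i l ls hpre hl
    rw [List.cons_append, aFindStart, if_neg (hpre p (List.mem_cons_self ..)),
        ih (i + 1) l ls (fun x hx => hpre x (List.mem_cons_of_mem _ hx)) hl]
    simp only [List.length_cons]
    push_cast
    omega

lemma aFindEnd_eq (ts : List String) : ∀ (pre : List String),
    aFindEnd (pre ++ ts) (PySem.List.pyRange (pre.length : Int) ((pre.length : Int) + ts.length) 1) =
      match List.findIdx? (fun t => PySem.Str.startswith t "## ") ts with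
      | some n => (pre.length : Int) + n
      | none => -1 := by
  induction ts with
  | nil =>
    intro pre
    rw [PySem.List.pyRange_one_eq_nil (by simp)]
    rfl
  | cons t ts ih =>
    intro pre
    rw [PySem.List.pyRange_one_cons (by push_cast [List.length_cons]; omega)]
    rw [aFindEnd, PySem.List.pyGet?_append_length, Option.getD_some]
    by_cases h1 : PySem.Str.startswith t "## " = true
    · rw [if_pos h1]
      simp only [List.findIdx?_cons]
      rw [if_pos h1]
      simp
    · rw [if_neg h1]
      have hre : pre ++ t :: ts = (pre ++ [t]) ++ ts := by simp
      have hlen : ((pre ++ [t]).length : Int) = (pre.length : Int) + 1 := by simp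
      have harg : (pre.length : Int) + ((t :: ts).length : Int)
          = ((pre ++ [t]).length : Int) + (ts.length : Int) := by
        rw [hlen]; push_cast [List.length_cons]; ring
      rw [harg, hre, show ((pre.length : Int) + 1) = ((pre ++ [t]).length : Int) from hlen.symm,
          ih (pre ++ [t])]
      simp only [List.findIdx?_cons]
      rw [if_neg h1]
      cases hfi : List.findIdx? (fun t => PySem.Str.startswith t "## ") ts with
      | none => simp
      | some n =>
        simp only [Option.map_some, hlen]
        push_cast
        ring_nf

-- the core loop equation: normalize the section up to the first "## "-line, then append the rest
lemma aLoop (ls : List String) : ∀ (out : List String) (prev : Bool),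
    ((List.take (endIdx ls) ls).foldl aStep (out, prev)).1 ++ List.drop (endIdx ls) ls
      = out ++ specNorm prev ls := by
  induction ls with
  | nil => intro out prev; simp [endIdx, specNorm]
  | cons t ts ih =>
    intro out prev
    by_cases h1 : PySem.Str.startswith t "## " = true
    · rw [endIdx_cons_pos t ts h1, List.take_zero, List.drop_zero, List.foldl_nil,
          specNorm, if_pos h1]
    · rw [endIdx_cons_neg t ts h1, List.take_succ_cons, List.drop_succ_cons, List.foldl_cons, specNorm, if_neg h1,
          aStep]
      by_cases h2 : PySem.Str.strip t = "" ∧ prev = true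
      · rw [if_pos h2, if_pos h2]
        exact ih out prev
      · rw [if_neg h2, if_neg h2, ih]
        simp

lemma A_none (lines : List String) (h : ∀ x ∈ lines, ¬ PySem.Str.strip x = pvHeader) :
    normalize_evidence_table_py lines = lines := by
  unfold normalize_evidence_table_py
  rw [aFindStart_none lines 0 h]
  norm_num

lemma A_found (pre : List String) (l : String) (ls : List String)
    (hpre : ∀ x ∈ pre, ¬ PySem.Str.strip x = pvHeader) (hl : PySem.Str.strip l = pvHeader) :
    normalize_evidence_table_py (pre ++ l :: ls)
      = pre ++ l :: specNorm (PySem.Str.startswith l "|") ls := by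
  unfold normalize_evidence_table_py
  rw [aFindStart_prefix pre 0 l ls hpre hl]
  rw [if_neg (by omega)]
  have e1 : (0 : Int) + (pre.length : Int) + 1 = ((pre ++ [l]).length : Int) := by
    simp
  have e2 : (((pre ++ l :: ls).length : Nat) : Int)
      = ((pre ++ [l]).length : Int) + (ls.length : Int) := by
    simp only [List.length_append, List.length_cons, List.length_nil]
    omega
  have e3 : pre ++ l :: ls = (pre ++ [l]) ++ ls := by simp
  rw [show aFindEnd (pre ++ l :: ls)
        (PySem.List.pyRange ((0 : Int) + (pre.length : Int) + 1) (((pre ++ l :: ls).length : Nat) : Int) 1)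
      = (match List.findIdx? (fun t => PySem.Str.startswith t "## ") ls with
         | some n => (((pre ++ [l]).length : Nat) : Int) + n
         | none => -1) by rw [e1, e2, e3]; exact aFindEnd_eq ls (pre ++ [l])]
  have hend : (match List.findIdx? (fun t => PySem.Str.startswith t "## ") ls with
         | some n => (((pre ++ [l]).length : Nat) : Int) + n
         | none => -1) = (((pre ++ [l]).length : Nat) : Int) + (endIdx ls : Int)
      ∨ ((match List.findIdx? (fun t => PySem.Str.startswith t "## ") ls with
         | some n => (((pre ++ [l]).length : Nat) : Int) + n
         | none => -1) = -1 ∧ endIdx ls = ls.length) := by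
    cases hfi : List.findIdx? (fun t => PySem.Str.startswith t "## ") ls with
    | none => right; exact ⟨rfl, by rw [endIdx, hfi]; rfl⟩
    | some n => left; rw [endIdx, hfi]; rfl
  -- in both cases the effective end is ↑((pre ++ [l]).length + endIdx ls)
  have main : ∀ hE1 : Int, hE1 = (((pre ++ [l]).length : Int) + (endIdx ls : Int)) →
      PySem.List.slice (pre ++ l :: ls) none (some ((0 : Int) + (pre.length : Int)))
        ++ ((PySem.List.slice (pre ++ l :: ls) (some ((0 : Int) + (pre.length : Int))) (some hE1)).foldl
              aStep (([] : List String), false)).1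
        ++ PySem.List.slice (pre ++ l :: ls) (some hE1) none
      = pre ++ l :: specNorm (PySem.Str.startswith l "|") ls := by
    intro E1 hE1
    have c0 : (0 : Int) + (pre.length : Int) = ((pre.length : Nat) : Int) := by omega
    have c1 : E1 = (((pre.length + 1 + endIdx ls : Nat)) : Int) := by
      rw [hE1]
      simp only [List.length_append, List.length_cons, List.length_nil]
      omega
    rw [c0, c1, PySem.List.slice_to_natCast, PySem.List.slice_natCast,
        PySem.List.slice_from_natCast]
    have d1 : (pre ++ l :: ls).take pre.length = pre := by simp
    have d2 : (pre ++ l :: ls).drop pre.length = l :: ls := by simp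
    have d3 : pre.length + 1 + endIdx ls - pre.length = 1 + endIdx ls := by omega
    have d4 : (pre ++ l :: ls).drop (pre.length + 1 + endIdx ls) = ls.drop (endIdx ls) := by
      have : pre.length + 1 + endIdx ls = pre.length + (1 + endIdx ls) := by omega
      rw [this]
      simp [List.drop_append, Nat.add_comm 1 (endIdx ls)]
    rw [d1, d2, d3, d4]
    have d5 : (l :: ls).take (1 + endIdx ls) = l :: ls.take (endIdx ls) := by
      rw [Nat.add_comm, List.take_succ_cons]
    rw [d5, List.foldl_cons]
    have d6 : aStep (([] : List String), false) l = ([l], PySem.Str.startswith l "|") := by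
      unfold aStep
      rw [if_neg (by rintro ⟨-, h⟩; cases h)]
      rfl
    rw [d6, List.append_assoc, aLoop ls [l] (PySem.Str.startswith l "|")]
    simp
  dsimp only
  rcases hend with h | ⟨h, hlen⟩
  · rw [h]
    rw [if_neg (by omega)]
    exact main _ rfl
  · rw [h]
    rw [if_pos (by norm_num)]
    exact main _ (by rw [hlen]; exact e2)

-- every list is header-free or splits at its first header line
lemma decompose (lines : List String) :
    (∀ x ∈ lines, ¬ PySem.Str.strip x = pvHeader) ∨
    ∃ pre l ls, lines = pre ++ l :: ls ∧ (∀ x ∈ pre, ¬ PySem.Str.strip x = pvHeader) ∧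
      PySem.Str.strip l = pvHeader := by
  induction lines with
  | nil => left; intro x hx; cases hx
  | cons l ls ih =>
    by_cases hl : PySem.Str.strip l = pvHeader
    · right
      refine ⟨[], l, ls, by simp, ?_, hl⟩
      intro x hx
      cases hx
    · rcases ih with h | ⟨pre, m, ms, rfl, hpre, hm⟩
      · left
        intro x hx
        rcases List.mem_cons.mp hx with rfl | hx
        · exact hl
        · exact h x hx
      · right
        exact ⟨l :: pre, m, ms, by simp, by
          intro x hx
          rcases List.mem_cons.mp hx with rfl | hx
          · exact hl
          · exact hpre x hx, hm⟩

theorem A_eq_specTop (lines : List String) :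
    normalize_evidence_table_py lines = specTop lines := by
  rcases decompose lines with h | ⟨pre, l, ls, rfl, hpre, hl⟩
  · rw [A_none lines h, specTop_id lines h]
  · rw [A_found pre l ls hpre hl, specTop_decomp pre l ls hpre hl]

-- ===== VERDICT (by name: the statement is the Claim_ definition above) =====
theorem normalize_evidence_table_py_spec : Claim_equal_normalize_evidence_table_py := by
  intro lines _
  unfold Spec_normalize_evidence_table_py
  rw [A_eq_specTop, B_eq_specTop]
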